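-- pv_equiv track=rewrite | github.com/igruntplay/IAP-1C2023 | Practica-8/ejercicio1.4.py | recorrerPalabra
-- ===== SOURCE A (Python) =====
-- def recorrerPalabra(palabra:str)->bool:
--     listaVocal:list[str] = ["a","e","i","o","u"]
--     contador:int = 0
--     for vocal in listaVocal:
--               if palabra.count(vocal) >=1: # Esto, si por lo menos contiene una vocal
--                     contador += 1
--     if contador >= 3:
--         return True
--     else:
--          return False
-- ===== SOURCE B (Python) =====
-- def recorrerPalabra(palabra: str) -> bool:
--     vistas = set()
--     for c in palabra:
--         if c in "aeiou":
--             vistas.add(c)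
--     return len(vistas) >= 3
-- ===== Notes on version B (the rewrite author's own statement) =====
-- stated objective: simpler
-- what changed: Replaces A's five whole-string count scans (one per vowel) and a counter with a single pass over the word that accumulates the distinct vowels seen into a set, returning the size comparison directly.
import Mathlib
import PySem

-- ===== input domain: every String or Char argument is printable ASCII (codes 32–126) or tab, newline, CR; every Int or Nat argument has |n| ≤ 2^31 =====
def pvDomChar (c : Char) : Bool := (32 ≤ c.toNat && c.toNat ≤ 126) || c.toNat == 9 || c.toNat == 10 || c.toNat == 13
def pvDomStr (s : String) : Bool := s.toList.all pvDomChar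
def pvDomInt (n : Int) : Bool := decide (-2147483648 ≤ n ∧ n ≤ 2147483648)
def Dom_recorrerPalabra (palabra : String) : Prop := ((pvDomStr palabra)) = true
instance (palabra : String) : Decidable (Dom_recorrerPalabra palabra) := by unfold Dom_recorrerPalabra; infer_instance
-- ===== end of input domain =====

-- B replaces A's five per-vowel whole-string count scans with one pass over the word
-- collecting the distinct vowels seen into a set (objective: simpler).

-- ===== PORT A =====
def recorrerPalabra (palabra : String) : Bool :=
  let listaVocal : List String := ["a", "e", "i", "o", "u"]
  let contador : Int :=
    listaVocal.foldl
      (fun contador vocal =>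
        if PySem.Str.count palabra vocal ≥ 1 then contador + 1 else contador)
      0
  if contador ≥ 3 then true else false

-- ===== PORT B =====
-- 'c in "aeiou"' for the single character c yielded by iterating the string is
-- exactly list membership of c in the characters of "aeiou".
def recorrerPalabra_alt (palabra : String) : Bool :=
  let vistas : PySem.Set Char :=
    palabra.toList.foldl
      (fun vistas c =>
        if "aeiou".toList.contains c then PySem.Set.add vistas c else vistas)
      PySem.Set.empty
  decide (PySem.Set.len vistas ≥ 3)

-- ===== PRECONDITION & SPEC =====
def Spec_recorrerPalabra (palabra : String) (out : Bool) : Prop := out = recorrerPalabra_alt palabra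
instance (palabra : String) (out : Bool) : Decidable (Spec_recorrerPalabra palabra out) := by unfold Spec_recorrerPalabra; infer_instance

-- ===== CLAIM (what is proved, stated in full; the proofs are below) =====
def Claim_equal_recorrerPalabra : Prop := ∀ (palabra : String), Dom_recorrerPalabra palabra → Spec_recorrerPalabra palabra (recorrerPalabra palabra)

-- ===== LEMMAS AND PROOFS =====

-- Python's substring count for a single-character needle is the character count.
theorem count_go_single (c : Char) (l : List Char) :
    ∀ (fuel acc : ℕ), l.length ≤ fuel →
      PySem.Chars.count.go [c] fuel l acc = acc + l.count c := by
  induction l with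
  | nil => intro fuel acc _; cases fuel <;> simp [PySem.Chars.count.go]
  | cons h t ih =>
    intro fuel acc hf
    cases fuel with
    | zero => simp at hf
    | succ n =>
      simp only [List.length_cons, Nat.succ_le_succ_iff] at hf
      by_cases hc : c = h
      · subst hc
        simp [PySem.Chars.count.go, List.isPrefixOf, ih n (acc + 1) hf]
        omega
      · simp [PySem.Chars.count.go, List.isPrefixOf, hc, ih n acc hf,
          Ne.symm hc]

theorem chars_count_single (l : List Char) (c : Char) :
    PySem.Chars.count l [c] = l.count c := by
  simp [PySem.Chars.count, count_go_single c l l.length 0 le_rfl]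

-- A's per-vowel test 'palabra.count(vocal) >= 1' is membership of that vowel.
theorem count_ge_one_iff (l : List Char) (c : Char) :
    (1 ≤ PySem.Chars.count l [c]) ↔ c ∈ l := by
  rw [chars_count_single]; exact List.one_le_count_iff

-- B's guarded fold of Set.add is the fold of Set.add over the filtered list.
theorem foldl_add_filter (p : Char → Bool) (l : List Char) :
    ∀ s : PySem.Set Char,
      l.foldl (fun s c => if p c then PySem.Set.add s c else s) s
        = (l.filter p).foldl PySem.Set.add s := by
  induction l with
  | nil => intro s; rfl
  | cons h t ih =>
    intro s
    by_cases hp : p h = true <;> simp [hp, ih]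

-- The size of set(xs) is the number of distinct elements of xs.
theorem len_ofList_toFinset (xs : List Char) :
    (PySem.Set.ofList xs).length = xs.toFinset.card := by
  rw [← List.toFinset_card_of_nodup (PySem.Set.nodup_ofList xs)]
  congr 1
  ext c
  simp [PySem.Set.mem_ofList]

theorem toFinset_filter_mem (l V : List Char) :
    (l.filter (fun c => V.contains c)).toFinset
      = (V.filter (fun v => l.contains v)).toFinset := by
  ext c
  simp [and_comm]

-- the number of distinct vowels occurring in l, as a Finset cardinality
theorem b_value (l : List Char) :
    (PySem.Set.ofList (l.filter (fun c => "aeiou".toList.contains c))).length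
      = (("aeiou".toList.filter (fun v => l.contains v))).toFinset.card := by
  rw [len_ofList_toFinset, toFinset_filter_mem]

-- ===== VERDICT (by name: the statement is the Claim_ definition above) =====
theorem recorrerPalabra_spec : Claim_equal_recorrerPalabra := by
  intro palabra _
  unfold Spec_recorrerPalabra recorrerPalabra recorrerPalabra_alt
  simp only [PySem.Str.count]
  rw [foldl_add_filter]
  rw [show (PySem.Set.empty : PySem.Set Char) = ([] : PySem.Set Char) from rfl]
  rw [← PySem.Set.ofList_eq_foldl (List.filter ("aeiou".toList.contains) palabra.toList)]
  simp only [PySem.Set.len]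
  simp only [b_value]
  have hv : ("aeiou".toList) = ['a', 'e', 'i', 'o', 'u'] := rfl
  have h1 : ("a".toList) = ['a'] := rfl
  have h2 : ("e".toList) = ['e'] := rfl
  have h3 : ("i".toList) = ['i'] := rfl
  have h4 : ("o".toList) = ['o'] := rfl
  have h5 : ("u".toList) = ['u'] := rfl
  simp only [List.foldl, ge_iff_le]
  simp only [hv, h1, h2, h3, h4, h5, count_ge_one_iff, List.filter, List.contains_eq_mem]
  set l := palabra.toList with hl
  by_cases pa : 'a' ∈ l <;> by_cases pe : 'e' ∈ l <;> by_cases pi : 'i' ∈ l <;>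
    by_cases po : 'o' ∈ l <;> by_cases pu : 'u' ∈ l <;>
    simp only [pa, pe, pi, po, pu, decide_true, decide_false] <;> decide
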